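-- pv_equiv track=rewrite | github.com/JohnNDvorak/zeta-odd-irrationaliity | src/zeta5_autoresearch/symmetric_dual_baseline_sym4_sixteen_window_affine_target_nullspace_fingerprint.py | _free_columns_summary
-- ===== SOURCE A (Python) =====
-- def _free_columns_summary(columns: tuple[int, ...]) -> str:
--     if not columns:
--         return ""
--     runs = []
--     run_start = columns[0]
--     previous = columns[0]
--     for column in columns[1:]:
--         if column == previous + 1:
--             previous = column
--             continue
--         runs.append(f"{run_start}" if run_start == previous else f"{run_start}..{previous}")
--         run_start = column
--         previous = column
--     runs.append(f"{run_start}" if run_start == previous else f"{run_start}..{previous}")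
--     return ", ".join(runs)
-- ===== SOURCE B (Python) =====
-- def _free_columns_summary(columns: tuple[int, ...]) -> str:
--     # Two-phase: group the enumerated columns into maximal chunks of constant
--     # key value-index (constant exactly on consecutive-integer runs), then
--     # format each chunk from its first and last value.
--     def chunks(pairs):
--         out = []
--         i = 0
--         while i < len(pairs):
--             key = pairs[i][1] - pairs[i][0]
--             k = i + 1
--             while k < len(pairs) and pairs[k][1] - pairs[k][0] == key:
--                 k += 1
--             out.append(pairs[i:k])
--             i = k
--         return out
--
--     runs = []
--     for g in chunks(list(enumerate(columns))):
--         start, end = g[0][1], g[-1][1]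
--         runs.append(f"{start}" if start == end else f"{start}..{end}")
--     return ", ".join(runs)
-- ===== Notes on version B (the rewrite author's own statement) =====
-- stated objective: alternative
-- what changed: Replaces A's single-pass run_start/previous accumulator with manual flush by a two-phase pass: group enumerate(columns) into maximal chunks of constant value-minus-index key, then format each chunk from its first and last element.
import Mathlib
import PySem

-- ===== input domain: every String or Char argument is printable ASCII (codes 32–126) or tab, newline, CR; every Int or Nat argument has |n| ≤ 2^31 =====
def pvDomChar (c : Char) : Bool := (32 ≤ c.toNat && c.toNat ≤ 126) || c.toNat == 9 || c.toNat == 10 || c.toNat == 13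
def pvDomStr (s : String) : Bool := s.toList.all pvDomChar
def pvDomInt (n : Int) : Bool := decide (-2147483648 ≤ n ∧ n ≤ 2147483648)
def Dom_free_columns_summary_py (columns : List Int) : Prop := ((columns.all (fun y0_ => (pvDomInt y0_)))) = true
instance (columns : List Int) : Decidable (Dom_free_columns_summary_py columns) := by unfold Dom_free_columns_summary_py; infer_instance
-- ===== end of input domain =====

-- B replaces A's running run_start/previous accumulator with a two-phase pass
-- (group enumerated columns into constant-key chunks, then format each chunk);
-- same cost, alternative structure.

-- ===== PORT A =====
-- f"{run_start}" if run_start == previous else f"{run_start}..{previous}"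
def pvFmtA (s p : Int) : String :=
  if s == p then PySem.Int.toStr s else PySem.Int.toStr s ++ ".." ++ PySem.Int.toStr p

def free_columns_summary_py (columns : List Int) : String :=
  match columns with
  | [] => ""
  | c0 :: rest =>
    let st := rest.foldl
      (fun acc column =>
        match acc with
        | (runs, run_start, previous) =>
          if column == previous + 1 then (runs, run_start, column)
          else (runs ++ [pvFmtA run_start previous], column, column))
      (([] : List String), c0, c0)
    PySem.Str.join ", " (st.1 ++ [pvFmtA st.2.1 st.2.2])

-- ===== PORT B =====
-- list(enumerate(columns)) with an Int index (so the key v - i is an Int subtraction)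
def pvEnumFrom (n : Int) : List Int → List (Int × Int)
  | [] => []
  | c :: cs => (n, c) :: pvEnumFrom (n + 1) cs

-- B's chunks(pairs): peel off the maximal prefix sharing the first pair's key v - i
def pvChunks : List (Int × Int) → List (List (Int × Int))
  | [] => []
  | p :: rest =>
    (p :: rest.takeWhile (fun q => q.2 - q.1 == p.2 - p.1)) ::
      pvChunks (rest.dropWhile (fun q => q.2 - q.1 == p.2 - p.1))
termination_by l => l.length
decreasing_by
  have := List.length_dropWhile_le (fun q : Int × Int => q.2 - q.1 == p.2 - p.1) rest
  simp; omega

-- start, end = g[0][1], g[-1][1] (chunks are nonempty, so the defaults are never read)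
def pvFmtB (g : List (Int × Int)) : String :=
  let s := (g.headD (0, 0)).2
  let e := (g.getLastD (0, 0)).2
  if s == e then PySem.Int.toStr s else PySem.Int.toStr s ++ ".." ++ PySem.Int.toStr e

def free_columns_summary_py_alt (columns : List Int) : String :=
  PySem.Str.join ", " ((pvChunks (pvEnumFrom 0 columns)).map pvFmtB)

-- ===== PRECONDITION & SPEC =====
def Spec_free_columns_summary_py (columns : List Int) (out : String) : Prop := out = free_columns_summary_py_alt columns
instance (columns : List Int) (out : String) : Decidable (Spec_free_columns_summary_py columns out) := by unfold Spec_free_columns_summary_py; infer_instance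

-- ===== CLAIM (what is proved, stated in full; the proofs are below) =====
def Claim_equal_free_columns_summary_py : Prop := ∀ (columns : List Int), Dom_free_columns_summary_py columns → Spec_free_columns_summary_py columns (free_columns_summary_py columns)

-- ===== LEMMAS AND PROOFS =====

-- reference run list: A's loop state (run_start = s, previous = p) over the remaining columns
def pvRunsOf (s p : Int) : List Int → List String
  | [] => [pvFmtA s p]
  | c :: cs => if c == p + 1 then pvRunsOf s c cs else pvFmtA s p :: pvRunsOf c c cs

lemma pvA_fold (cs : List Int) : ∀ (runs : List String) (s p : Int),
    (let st := cs.foldl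
      (fun acc column =>
        match acc with
        | (runs, run_start, previous) =>
          if column == previous + 1 then (runs, run_start, column)
          else (runs ++ [pvFmtA run_start previous], column, column))
      (runs, s, p)
     st.1 ++ [pvFmtA st.2.1 st.2.2]) = runs ++ pvRunsOf s p cs := by
  induction cs with
  | nil => intro runs s p; simp [pvRunsOf]
  | cons c cs ih =>
    intro runs s p
    simp only [List.foldl_cons, pvRunsOf]
    by_cases h : c == p + 1
    · simp only [h]
      simpa using ih runs s c
    · simp only [h]
      simpa using ih (runs ++ [pvFmtA s p]) c c

lemma pvFmtB_cons (m v : Int) (g : List (Int × Int)) :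
    pvFmtB ((m, v) :: g) = pvFmtA v (g.getLastD (m, v)).2 := by
  simp only [pvFmtB, pvFmtA, List.headD_cons, List.getLastD_cons]

lemma pvB_main (cs : List Int) : ∀ (n s p : Int),
    pvFmtA s (((pvEnumFrom (n + 1) cs).takeWhile (fun q => q.2 - q.1 == p - n)).getLastD (n, p)).2
      :: ((pvChunks ((pvEnumFrom (n + 1) cs).dropWhile (fun q => q.2 - q.1 == p - n))).map pvFmtB)
    = pvRunsOf s p cs := by
  induction cs with
  | nil => intro n s p; simp [pvEnumFrom, pvChunks, pvRunsOf]
  | cons c cs ih =>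
    intro n s p
    simp only [pvEnumFrom]
    by_cases h : c = p + 1
    · have hkey : p - n = c - (n + 1) := by omega
      rw [hkey]
      rw [List.takeWhile_cons_of_pos (p := fun q : Int × Int => q.2 - q.1 == c - (n + 1))
            (by simp),
          List.dropWhile_cons_of_pos (p := fun q : Int × Int => q.2 - q.1 == c - (n + 1))
            (by simp),
          List.getLastD_cons]
      have hres := ih (n + 1) s c
      simp only [pvRunsOf, show (c == p + 1) = true by simp [h], if_true]
      exact hres
    · have hk : ((fun q : Int × Int => q.2 - q.1 == p - n) (n + 1, c)) = false := by
        simp; omega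
      rw [List.takeWhile_cons_of_neg (by simp_all), List.dropWhile_cons_of_neg (by simp_all),
        List.getLastD_nil]
      rw [show pvChunks ((n + 1, c) :: pvEnumFrom (n + 1 + 1) cs) =
            ((n + 1, c) :: (pvEnumFrom (n + 1 + 1) cs).takeWhile
                (fun q => q.2 - q.1 == c - (n + 1))) ::
              pvChunks ((pvEnumFrom (n + 1 + 1) cs).dropWhile
                (fun q => q.2 - q.1 == c - (n + 1))) from by rw [pvChunks]]
      rw [List.map_cons, pvFmtB_cons]
      have hres := ih (n + 1) c c
      simp only [pvRunsOf, show (c == p + 1) = false by simp [h], if_false, Bool.false_eq_true]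
      rw [hres]

-- ===== VERDICT (by name: the statement is the Claim_ definition above) =====
theorem free_columns_summary_py_spec : Claim_equal_free_columns_summary_py := by
  intro columns _
  unfold Spec_free_columns_summary_py
  cases columns with
  | nil =>
    show ("" : String) = free_columns_summary_py_alt []
    unfold free_columns_summary_py_alt
    rw [show pvEnumFrom 0 [] = ([] : List (Int × Int)) from rfl,
        show pvChunks [] = ([] : List (List (Int × Int))) from by rw [pvChunks]]
    decide
  | cons c cs =>
    have hA : free_columns_summary_py (c :: cs) = PySem.Str.join ", " ([] ++ pvRunsOf c c cs) :=
      congrArg (PySem.Str.join ", ") (pvA_fold cs [] c c)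
    rw [hA, List.nil_append]
    unfold free_columns_summary_py_alt
    rw [show pvEnumFrom 0 (c :: cs) = (0, c) :: pvEnumFrom 1 cs from rfl]
    rw [show pvChunks ((0, c) :: pvEnumFrom 1 cs) =
          ((0, c) :: (pvEnumFrom 1 cs).takeWhile (fun q => q.2 - q.1 == c - 0)) ::
            pvChunks ((pvEnumFrom 1 cs).dropWhile (fun q => q.2 - q.1 == c - 0)) from by
        rw [pvChunks]]
    rw [List.map_cons, pvFmtB_cons]
    have hres := pvB_main cs 0 c c
    simp only [zero_add] at hres
    rw [hres]
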